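-- pv_equiv track=rewrite | github.com/PythonIsMagic/eular_python | toolkit.py | get_right_diagonals
-- ===== SOURCE A (Python) =====
-- def extract_line(matrix, point, xyincrement):
--     """ Takes an x by x matrix and scans a matrix for a list of items.
--
--         Uses a starting point tuple (x, y) and an increment tuple(x-increment, y-increment).
--         Starts the list from the x, y coordinate and goes in the increments given by xinc and yinc.
--     """
--     x, y = point[0], point[1]
--     xinc, yinc = xyincrement[0], xyincrement[1]
--     items = []
--
--     while 0 <= x < len(matrix) and y >= 0 and y < len(matrix):
--         items.append(matrix[y][x])
--         x += xinc
--         y += yinc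
--     return items
--
-- def get_right_diagonals(matrix):
--     """ Extracts all the right-facing diagonal lines of a matrix and returns
--         them as a list.
--     """
--
--     diags = []
--
--     # Scan right diagonals: bottom left to top left.
--     for i in range(len(matrix) - 1, 0, -1):
--         point = (0, i)
--         inc = (1, 1)
--         diags.append(extract_line(matrix, point, inc))
--
--     # Scan right diagonals: top left to top right
--     for i in range(len(matrix)):
--         point = (i, 0)
--         inc = (1, 1)
--         diags.append(extract_line(matrix, point, inc))
--
--     return diags
-- ===== SOURCE B (Python) =====
-- def get_right_diagonals(matrix):
--     """ Extracts all right-facing diagonals, one index-arithmetic comprehension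
--         per diagonal key k = col - row, k running from -(n-1) to n-1. """
--     n = len(matrix)
--     return [[matrix[y][y + k] for y in range(max(0, -k), n - max(0, k))]
--             for k in range(-(n - 1), n)]
-- ===== Notes on version B (the rewrite author's own statement) =====
-- stated objective: simpler
-- what changed: Replaces the per-diagonal directed while-loop walks (two scan loops calling extract_line) with a single nested comprehension that builds each diagonal directly by index arithmetic keyed by k = col - row.
import Mathlib
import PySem

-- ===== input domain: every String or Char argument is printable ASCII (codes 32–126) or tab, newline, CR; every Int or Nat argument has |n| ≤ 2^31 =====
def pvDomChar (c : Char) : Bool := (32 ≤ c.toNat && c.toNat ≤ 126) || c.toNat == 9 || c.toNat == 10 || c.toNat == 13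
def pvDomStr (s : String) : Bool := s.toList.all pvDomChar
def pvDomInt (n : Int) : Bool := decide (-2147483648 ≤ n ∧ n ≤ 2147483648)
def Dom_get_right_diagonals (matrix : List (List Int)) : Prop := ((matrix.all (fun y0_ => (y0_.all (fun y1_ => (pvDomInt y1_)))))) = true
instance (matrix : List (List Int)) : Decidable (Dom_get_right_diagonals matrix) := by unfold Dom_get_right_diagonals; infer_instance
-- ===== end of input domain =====

-- B replaces the per-diagonal directed walks of A with one index-arithmetic
-- comprehension per diagonal key k = col - row (objective: simpler).

-- matrix[y][x]; exact under Pre_ (0 ≤ x,y < len matrix and every row long enough)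
def pyCell (matrix : List (List Int)) (y x : Int) : Int :=
  (PySem.List.pyGet? ((PySem.List.pyGet? matrix y).getD []) x).getD 0

-- ===== PORT A =====
-- the while-loop of extract_line; fuel (len matrix + 1) suffices for the (1,1)
-- increments A uses, since x rises by 1 each step and the loop needs x < len
def extractLineGo (matrix : List (List Int)) (xinc yinc : Int) :
    Nat → Int → Int → List Int
  | 0, _, _ => []
  | fuel + 1, x, y =>
    if 0 ≤ x ∧ x < (matrix.length : Int) ∧ 0 ≤ y ∧ y < (matrix.length : Int) then
      pyCell matrix y x :: extractLineGo matrix xinc yinc fuel (x + xinc) (y + yinc)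
    else []

def extract_line (matrix : List (List Int)) (point : Int × Int)
    (xyincrement : Int × Int) : List Int :=
  extractLineGo matrix xyincrement.1 xyincrement.2 (matrix.length + 1) point.1 point.2

def get_right_diagonals (matrix : List (List Int)) : List (List Int) :=
  let diags : List (List Int) :=
    (PySem.List.pyRange ((matrix.length : Int) - 1) 0 (-1)).foldl
      (fun acc i => acc ++ [extract_line matrix (0, i) (1, 1)]) []
  (PySem.List.pyRange 0 (matrix.length : Int) 1).foldl
    (fun acc i => acc ++ [extract_line matrix (i, 0) (1, 1)]) diags

-- ===== PORT B =====
-- the diagonal with key k = col - row: [matrix[y][y+k] for y in range(max(0,-k), n-max(0,k))]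
def diagB (matrix : List (List Int)) (k : Int) : List Int :=
  (PySem.List.pyRange (max 0 (-k)) ((matrix.length : Int) - max 0 k) 1).map
    (fun y => pyCell matrix y (y + k))

def get_right_diagonals_alt (matrix : List (List Int)) : List (List Int) :=
  (PySem.List.pyRange (-((matrix.length : Int) - 1)) (matrix.length : Int) 1).map
    (diagB matrix)

-- ===== PRECONDITION & SPEC =====
-- Pre_ excludes exactly the ragged matrices with a row shorter than len(matrix),
-- on which the Python A raises IndexError.
def Pre_get_right_diagonals (matrix : List (List Int)) : Prop :=
  ∀ row ∈ matrix, matrix.length ≤ row.length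
instance (matrix : List (List Int)) : Decidable (Pre_get_right_diagonals matrix) := by
  unfold Pre_get_right_diagonals; infer_instance

def pvWitness_get_right_diagonals : List (List Int) := [[1, 2], [3, 4]]

def Spec_get_right_diagonals (matrix : List (List Int)) (out : List (List Int)) : Prop :=
  out = get_right_diagonals_alt matrix
instance (matrix : List (List Int)) (out : List (List Int)) :
    Decidable (Spec_get_right_diagonals matrix out) := by
  unfold Spec_get_right_diagonals; infer_instance

-- ===== CLAIM (what is proved, stated in full; the proofs are below) =====
def Claim_equal_get_right_diagonals : Prop :=
  ∀ (matrix : List (List Int)), Dom_get_right_diagonals matrix →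
    Pre_get_right_diagonals matrix →
    Spec_get_right_diagonals matrix (get_right_diagonals matrix)

-- ===== LEMMAS AND PROOFS =====

-- the (1,1) walk is the obvious index-arithmetic map
theorem extractLineGo_one_one (matrix : List (List Int)) :
    ∀ (fuel : Nat) (x y : Int), 0 ≤ x → 0 ≤ y →
      (min ((matrix.length : Int) - x) ((matrix.length : Int) - y)).toNat ≤ fuel →
      extractLineGo matrix 1 1 fuel x y =
        (List.range (min ((matrix.length : Int) - x) ((matrix.length : Int) - y)).toNat).map
          (fun t : Nat => pyCell matrix (y + (t : Int)) (x + (t : Int))) := by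
  intro fuel
  induction fuel with
  | zero =>
    intro x y hx hy hf
    have : (min ((matrix.length : Int) - x) ((matrix.length : Int) - y)).toNat = 0 := by omega
    simp [extractLineGo, this]
  | succ f ih =>
    intro x y hx hy hf
    by_cases h : 0 ≤ x ∧ x < (matrix.length : Int) ∧ 0 ≤ y ∧ y < (matrix.length : Int)
    · have hs : (min ((matrix.length : Int) - x) ((matrix.length : Int) - y)).toNat =
        (min ((matrix.length : Int) - (x + 1)) ((matrix.length : Int) - (y + 1))).toNat + 1 := by
        omega
      rw [extractLineGo, if_pos h, ih (x + 1) (y + 1) (by omega) (by omega) (by omega),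
        hs, List.range_succ_eq_map, List.map_cons, List.map_map]
      congr 1
      · congr 1 <;> push_cast <;> ring
      · apply List.map_congr_left
        intro t _
        simp only [Function.comp_apply]
        congr 1 <;> push_cast <;> ring
    · have : (min ((matrix.length : Int) - x) ((matrix.length : Int) - y)).toNat = 0 := by omega
      rw [extractLineGo, if_neg h, this]
      simp

-- A's diagonal starting on the left edge at row i is B's bucket for key -i
theorem extract_left (matrix : List (List Int)) (i : Int) (hi : 0 ≤ i) :
    extract_line matrix (0, i) (1, 1) = diagB matrix (-i) := by
  unfold extract_line diagB
  rw [extractLineGo_one_one matrix (matrix.length + 1) 0 i le_rfl hi (by omega),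
    PySem.List.pyRange_one, List.map_map]
  have h1 : max 0 (- -i) = i := by omega
  have h2 : (matrix.length : Int) - max 0 (-i) = (matrix.length : Int) := by omega
  rw [h1, h2]
  have h3 : (min ((matrix.length : Int) - 0) ((matrix.length : Int) - i)).toNat =
      ((matrix.length : Int) - i).toNat := by omega
  rw [h3]
  apply List.map_congr_left
  intro t _
  simp only [Function.comp_apply]
  congr 1
  ring

-- A's diagonal starting on the top edge at column i is B's bucket for key i
theorem extract_top (matrix : List (List Int)) (i : Int) (hi : 0 ≤ i) :
    extract_line matrix (i, 0) (1, 1) = diagB matrix i := by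
  unfold extract_line diagB
  rw [extractLineGo_one_one matrix (matrix.length + 1) i 0 hi le_rfl (by omega),
    PySem.List.pyRange_one, List.map_map]
  have h1 : max 0 (-i) = 0 := by omega
  rw [h1]
  have h3 : (min ((matrix.length : Int) - i) ((matrix.length : Int) - 0)).toNat =
      ((matrix.length : Int) - max 0 i - 0).toNat := by omega
  rw [h3]
  apply List.map_congr_left
  intro t _
  simp only [Function.comp_apply]
  congr 1
  ring

-- ===== VERDICT (by name: the statement is the Claim_ definition above) =====
theorem get_right_diagonals_spec : Claim_equal_get_right_diagonals := by
  intro matrix _ _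
  unfold Spec_get_right_diagonals get_right_diagonals get_right_diagonals_alt
  simp only [PySem.List.foldl_append_singleton_eq_map, List.nil_append]
  rcases List.eq_nil_or_concat matrix with h | ⟨_, _, _⟩
  · subst h; decide
  · have hn : 1 ≤ (matrix.length : Int) := by
      rename_i h; simp [h]
    rw [PySem.List.pyRange_one_append (-((matrix.length : Int) - 1)) 0 (matrix.length : Int)
        (by omega) (by omega), List.map_append]
    congr 1
    · rw [PySem.List.pyRange_neg_one, PySem.List.pyRange_one, List.map_map, List.map_map]
      have hl : ((matrix.length : Int) - 1 - 0).toNat = (0 - -((matrix.length : Int) - 1)).toNat := by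
        omega
      rw [hl]
      apply List.map_congr_left
      intro t ht
      rw [List.mem_range] at ht
      simp only [Function.comp_apply]
      rw [extract_left matrix ((matrix.length : Int) - 1 - (t : Int)) (by omega)]
      congr 1
      ring
    · apply List.map_congr_left
      intro i hi
      rw [PySem.List.mem_pyRange_one] at hi
      exact extract_top matrix i hi.1
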